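-- pv_equiv track=rewrite | github.com/targed/test-projects | lexer/lexer.py | is_string_literal
-- ===== SOURCE A (Python) =====
-- def is_string_literal(s):
--     if len(s) < 2:
--         return False
--
--     # Must start and end with double quotes
--     if s[0] != '"' or s[-1] != '"':
--         return False
--
--     # Must have at least one character between quotes
--     if len(s) == 2:
--         return False
--
--     # Check characters between quotes
--     pos = 1
--     while pos < len(s) - 1:
--         # No spaces or double quotes allowed
--         if s[pos] == '"' or s[pos].isspace():
--             return False
--         pos += 1
--
--     return True
-- ===== SOURCE B (Python) =====
-- import re
--
-- # matches an opening quote, one or more chars that are neither '"' nor whitespace, a closing quote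
-- _STRING_LIT = re.compile(r'"[^"\s]+"')
--
-- def is_string_literal(s):
--     return _STRING_LIT.fullmatch(s) is not None
-- ===== Notes on version B (the rewrite author's own statement) =====
-- stated objective: idiomatic
-- what changed: Replaces the explicit index while-loop with early returns by a single compiled regex fullmatch whose pattern requires an opening quote, one or more characters that are neither a quote nor whitespace, and a closing quote.
import Mathlib
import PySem

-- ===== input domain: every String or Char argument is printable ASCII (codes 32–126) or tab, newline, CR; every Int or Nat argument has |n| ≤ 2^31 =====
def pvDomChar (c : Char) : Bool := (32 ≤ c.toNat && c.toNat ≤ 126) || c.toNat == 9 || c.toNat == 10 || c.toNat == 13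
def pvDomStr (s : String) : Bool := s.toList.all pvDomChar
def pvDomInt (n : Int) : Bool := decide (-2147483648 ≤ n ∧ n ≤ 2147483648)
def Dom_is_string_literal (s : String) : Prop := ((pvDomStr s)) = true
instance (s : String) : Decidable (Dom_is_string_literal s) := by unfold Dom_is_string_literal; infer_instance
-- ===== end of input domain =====

-- B replaces A's index while-loop by a single regex fullmatch of quote, one-or-more non-quote non-whitespace chars, quote — idiomatic, same cost.


-- ===== PORT A =====
-- the 'while pos < len(s) - 1' loop of A, step for step
def loopA (cs : List Char) (pos : Nat) : Bool :=
  if _h : pos < cs.length - 1 then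
    match PySem.List.pyGet? cs (pos : Int) with
    | some c => if c == '"' || PySem.Chars.isspace c then false else loopA cs (pos + 1)
    | none => false
  else true
termination_by cs.length - pos
decreasing_by omega

def is_string_literal (s : String) : Bool :=
  let cs := s.toList
  if cs.length < 2 then false
  else if !(PySem.List.pyGet? cs 0 == some '"') || !(PySem.List.pyGet? cs (-1) == some '"') then false
  else if cs.length == 2 then false
  else loopA cs 1

-- ===== PORT B =====
-- regex tail state after at least one interior char: matches ([^"\s])*"  followed by end of input
def reRest : List Char → Bool
  | [] => false
  | ['"'] => true
  | c :: rest => !(c == '"' || PySem.Chars.isspace c) && reRest rest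

-- fullmatch of  "[^"\s]+"  : opening quote, one interior char consumed, then reRest
def is_string_literal_alt (s : String) : Bool :=
  match s.toList with
  | '"' :: c :: rest => !(c == '"' || PySem.Chars.isspace c) && reRest rest
  | _ => false

-- ===== PRECONDITION & SPEC =====
def Spec_is_string_literal (s : String) (out : Bool) : Prop := out = is_string_literal_alt s
instance (s : String) (out : Bool) : Decidable (Spec_is_string_literal s out) := by unfold Spec_is_string_literal; infer_instance

-- ===== CLAIM (what is proved, stated in full; the proofs are below) =====
def Claim_equal_is_string_literal : Prop := ∀ (s : String), Dom_is_string_literal s → Spec_is_string_literal s (is_string_literal s)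

-- ===== LEMMAS AND PROOFS =====

def goodChar (c : Char) : Bool := !(c == '"' || PySem.Chars.isspace c)

theorem loopA_eq (cs : List Char) : ∀ (n pos : Nat), cs.length - pos = n →
    loopA cs pos = ((cs.drop pos).dropLast).all goodChar := by
  intro n
  induction n with
  | zero =>
    intro pos h
    unfold loopA
    rw [dif_neg (by omega : ¬ pos < cs.length - 1),
        List.drop_eq_nil_of_le (by omega : cs.length ≤ pos)]
    rfl
  | succ k ih =>
    intro pos h
    unfold loopA
    by_cases hlt : pos < cs.length - 1
    · have hpl : pos < cs.length := by omega
      have hget : PySem.List.pyGet? cs (pos : Int) = some cs[pos] := by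
        rw [PySem.List.pyGet?_natCast]
        exact List.getElem?_eq_getElem hpl
      have hdrop : cs.drop pos = cs[pos] :: cs.drop (pos + 1) :=
        List.drop_eq_getElem_cons hpl
      have htail : cs.drop (pos + 1) ≠ [] := by
        intro hnil
        have hlen := List.length_drop (l := cs) (i := pos + 1)
        rw [hnil] at hlen
        simp at hlen
        omega
      rw [hdrop, List.dropLast_cons_of_ne_nil htail]
      rw [dif_pos hlt, hget, ih (pos + 1) (by omega)]
      by_cases hc : (cs[pos] == '"' || PySem.Chars.isspace cs[pos]) = true <;>
        simp [hc, List.all_cons, goodChar]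
    · rw [dif_neg hlt]
      have hnil : (cs.drop pos).dropLast = [] := by
        have h1 : (cs.drop pos).length ≤ 1 := by
          rw [List.length_drop]; omega
        have h2 : ((cs.drop pos).dropLast).length = (cs.drop pos).length - 1 := by simp
        exact List.eq_nil_of_length_eq_zero (by omega)
      rw [hnil]; rfl

theorem reRest_eq (rest : List Char) :
    reRest rest = ((rest.getLast? == some '"') && rest.dropLast.all goodChar) := by
  induction rest with
  | nil => rfl
  | cons c t ih =>
    cases t with
    | nil =>
      by_cases hc : c = '"' <;> simp [reRest, hc]
    | cons d u =>
      have hstep : reRest (c :: d :: u)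
          = (!(c == '"' || PySem.Chars.isspace c) && reRest (d :: u)) := by
        simp [reRest]
      rw [hstep, ih]
      simp [goodChar, List.getLast?_cons_cons, Bool.and_assoc, Bool.and_left_comm, Bool.and_comm]

theorem ab_eq (cs : List Char) :
    (if cs.length < 2 then false
     else if !(PySem.List.pyGet? cs 0 == some '"') || !(PySem.List.pyGet? cs (-1) == some '"') then false
     else if cs.length == 2 then false
     else loopA cs 1)
    = (match cs with
       | '"' :: c :: rest => !(c == '"' || PySem.Chars.isspace c) && reRest rest
       | _ => false) := by
  cases cs with
  | nil => rfl
  | cons a t =>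
    cases t with
    | nil =>
      have hB : (match [a] with
          | '"' :: c :: rest => !(c == '"' || PySem.Chars.isspace c) && reRest rest
          | _ => false) = false := by
        split
        · rename_i heq; simp at heq
        · rfl
      rw [hB, if_pos (by simp)]
    | cons b u =>
      by_cases ha : a = '"'
      · subst ha
        have hR : (match '"' :: b :: u with
            | '"' :: c :: rest => !(c == '"' || PySem.Chars.isspace c) && reRest rest
            | _ => false) = (!(b == '"' || PySem.Chars.isspace b) && reRest u) := rfl
        rw [hR, reRest_eq, if_neg (by simp),
            loopA_eq _ (('"' :: b :: u).length - 1) 1 rfl,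
            PySem.List.pyGet?_neg_one]
        cases u with
        | nil =>
          by_cases hb : b = '"' <;>
            simp [hb]
        | cons e v =>
          have hne : e :: v ≠ ([] : List Char) := by simp
          simp only [PySem.List.pyGet?_zero_cons, List.getLast?_cons_cons,
            List.drop_succ_cons, List.drop_zero,
            List.dropLast_cons_of_ne_nil hne, List.all_cons]
          by_cases hl : ((e :: v).getLast? == some '"') = true
          · simp [hl, goodChar, Bool.and_left_comm, Bool.and_comm]
          · simp only [Bool.not_eq_true] at hl
            simp [hl]
      · have hA : (if (a :: b :: u).length < 2 then false
            else if !(PySem.List.pyGet? (a :: b :: u) 0 == some '"') || !(PySem.List.pyGet? (a :: b :: u) (-1) == some '"') then false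
            else if (a :: b :: u).length == 2 then false
            else loopA (a :: b :: u) 1) = false := by
          simp [PySem.List.pyGet?_zero_cons, ha]
        have hB : (match a :: b :: u with
            | '"' :: c :: rest => !(c == '"' || PySem.Chars.isspace c) && reRest rest
            | _ => false) = false := by
          split
          · rename_i heq
            injection heq with h1 _
            exact absurd h1 ha
          · rfl
        rw [hB]
        exact hA

-- ===== VERDICT (by name: the statement is the Claim_ definition above) =====
theorem is_string_literal_spec : Claim_equal_is_string_literal := by
  intro s _hdom
  unfold Spec_is_string_literal is_string_literal is_string_literal_alt
  exact ab_eq s.toList
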